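-- pv_equiv track=rewrite | github.com/lusm554/codewars-kata | 6-kyu/Creating-a-string-for-an-array-of-objects-from-a-set-of-words.py | words_to_object
-- ===== SOURCE A (Python) =====
-- from itertools import islice
--
-- def chunk(it, size):
--     it = iter(it)
--     return iter(lambda: tuple(islice(it, size)), ())
--
-- def words_to_object(s):
--     try:
--         res = []
--         for name, id in chunk(s.split(" "), 2):
--             c = {
--                 "name": name,
--                 "id": id
--             }
--             c = f"{{name : '{name}', id : '{id}'}}"
--             res.append(c)
--
--         return f"[{', '.join(res)}]"
--     except:
--         return "[]"
-- ===== SOURCE B (Python) =====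
-- def words_to_object(s):
--     words = s.split(" ")
--     if len(words) % 2:
--         return "[]"
--     parts = [f"{{name : '{words[i]}', id : '{words[i+1]}'}}"
--              for i in range(0, len(words), 2)]
--     return "[" + ", ".join(parts) + "]"
-- ===== Notes on version B (the rewrite author's own statement) =====
-- stated objective: idiomatic
-- what changed: Replaced the iterator/islice chunking plus blanket try/except with a direct parity check on the word count and an index-based list comprehension over range(0, len, 2).
import Mathlib
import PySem

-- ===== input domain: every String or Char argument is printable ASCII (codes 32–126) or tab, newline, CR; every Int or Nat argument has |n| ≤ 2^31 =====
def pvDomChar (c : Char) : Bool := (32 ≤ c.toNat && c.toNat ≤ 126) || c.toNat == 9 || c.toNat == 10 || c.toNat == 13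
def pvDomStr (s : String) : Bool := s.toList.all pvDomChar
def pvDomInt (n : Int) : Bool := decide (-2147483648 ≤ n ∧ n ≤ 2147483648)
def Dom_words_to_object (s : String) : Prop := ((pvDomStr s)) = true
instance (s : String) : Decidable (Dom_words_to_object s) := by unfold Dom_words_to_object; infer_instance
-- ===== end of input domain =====

-- B replaces A's iterator-chunking + blanket try/except by a parity check and an
-- index comprehension over range(0, len, 2); same result, plainer code.

-- ===== PORT A =====
-- the f-string f"{{name : '{name}', id : '{id}'}}"
def pvFmt (name id_ : String) : String :=
  "{name : '" ++ name ++ "', id : '" ++ id_ ++ "'}"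

-- 'for name, id in chunk(words, 2): res.append(…)'; the final 1-tuple of an
-- odd-length list fails to unpack (ValueError) → none (caught by 'except')
def pvChunkLoop : List String → List String → Option (List String)
  | [], res => some res
  | [_], _ => none
  | name :: id_ :: rest, res => pvChunkLoop rest (res ++ [pvFmt name id_])

def words_to_object (s : String) : String :=
  let ws := (PySem.Str.split? s " ").getD []   -- sep is the literal " " ≠ "", so split? is always some
  match pvChunkLoop ws [] with
  | some res => "[" ++ PySem.Str.join ", " res ++ "]"
  | none => "[]"

-- ===== PORT B =====
def words_to_object_alt (s : String) : String :=
  let ws := (PySem.Str.split? s " ").getD []   -- sep is the literal " " ≠ "", so split? is always some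
  if ws.length % 2 = 1 then "[]"
  else
    -- comprehension indices i, i+1 are always in range here, so the default "" is never used (exact)
    let parts := (PySem.List.pyRange 0 (ws.length : Int) 2).map
      (fun i => pvFmt (PySem.List.pyGetD ws i "") (PySem.List.pyGetD ws (i + 1) ""))
    "[" ++ PySem.Str.join ", " parts ++ "]"

-- ===== PRECONDITION & SPEC =====
def Spec_words_to_object (s : String) (out : String) : Prop := out = words_to_object_alt s
instance (s : String) (out : String) : Decidable (Spec_words_to_object s out) := by unfold Spec_words_to_object; infer_instance

-- ===== CLAIM (what is proved, stated in full; the proofs are below) =====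
def Claim_equal_words_to_object : Prop := ∀ (s : String), Dom_words_to_object s → Spec_words_to_object s (words_to_object s)

-- ===== LEMMAS AND PROOFS =====
-- the list of formatted pairs, taken two words at a time
def pvPairs : List String → List String
  | name :: id_ :: rest => pvFmt name id_ :: pvPairs rest
  | _ => []

theorem pvChunkLoop_eq (ws res : List String) :
    pvChunkLoop ws res =
      if ws.length % 2 = 1 then none else some (res ++ pvPairs ws) := by
  induction ws, res using pvChunkLoop.induct with
  | case1 res => simp [pvChunkLoop, pvPairs]
  | case2 res a => simp [pvChunkLoop]
  | case3 name id_ rest res ih =>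
    simp only [pvChunkLoop, pvPairs, ih, List.length_cons]
    rw [show (rest.length + 1 + 1) % 2 = rest.length % 2 from by omega]
    by_cases hh : rest.length % 2 = 1
    · simp [hh]
    · simp [hh]

theorem pvRangeMap_eq (m : Nat) : ∀ (ws : List String), ws.length = 2 * m →
    (List.range m).map
      (fun (k : Nat) => pvFmt (PySem.List.pyGetD ws (0 + 2 * (k : Int)) "")
                      (PySem.List.pyGetD ws (0 + 2 * (k : Int) + 1) "")) = pvPairs ws := by
  induction m with
  | zero =>
    intro ws h
    have : ws = [] := List.length_eq_zero_iff.mp (by omega)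
    subst this
    simp [pvPairs]
  | succ m ih =>
    intro ws h
    match ws, h with
    | a :: b :: rest, h =>
      have hlen : rest.length = 2 * m := by simp at h; omega
      rw [List.range_succ_eq_map, List.map_cons, List.map_map]
      have h0 : ∀ (j : Int), 0 ≤ j →
          PySem.List.pyGetD (a :: b :: rest) (j + 2) "" = PySem.List.pyGetD rest j "" := by
        intro j hj
        obtain ⟨n, rfl⟩ := Int.eq_ofNat_of_zero_le hj
        rw [show ((n : Int) + 2) = ((n + 2 : Nat) : Int) from by push_cast; ring,
          PySem.List.pyGetD_natCast, PySem.List.pyGetD_natCast]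
        simp [List.getD]
      rw [show pvPairs (a :: b :: rest) = pvFmt a b :: pvPairs rest from rfl]
      congr 1
      · rw [show (0 : Int) + 2 * ((0 : Nat) : Int) = ((0 : Nat) : Int) from by push_cast; try ring]
        rw [show ((0 : Nat) : Int) + 1 = ((1 : Nat) : Int) from by push_cast; try ring]
        rw [PySem.List.pyGetD_natCast, PySem.List.pyGetD_natCast]
        simp [List.getD]
      · rw [← ih rest hlen]
        apply List.map_congr_left
        intro k _
        simp only [Function.comp, Nat.succ_eq_add_one]
        rw [show (0 : Int) + 2 * ((k + 1 : Nat) : Int) = (0 + 2 * (k : Int)) + 2 from by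
              push_cast; ring,
            h0 _ (by positivity)]
        rw [show (0 + 2 * (k : Int)) + 2 + 1 = (0 + 2 * (k : Int) + 1) + 2 from by ring,
            h0 _ (by positivity)]

theorem pyRange_two (n : Nat) :
    PySem.List.pyRange 0 (n : Int) 2 =
      (List.range ((n + 1) / 2)).map (fun (k : Nat) => (0 : Int) + 2 * (k : Int)) := by
  rw [PySem.List.pyRange_of_pos 0 (n : Int) (by norm_num)]
  rw [show (if (0 : Int) < (n : Int) then (((n : Int) - 0 + 2 - 1) / 2).toNat else 0) = (n + 1) / 2
      from by split_ifs with h <;> omega]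

-- ===== VERDICT (by name: the statement is the Claim_ definition above) =====
theorem pvKey (ws : List String) :
    (match pvChunkLoop ws [] with
      | some res => "[" ++ PySem.Str.join ", " res ++ "]"
      | none => "[]") =
    (if ws.length % 2 = 1 then "[]"
     else "[" ++ PySem.Str.join ", "
        ((PySem.List.pyRange 0 (ws.length : Int) 2).map
          (fun i => pvFmt (PySem.List.pyGetD ws i "") (PySem.List.pyGetD ws (i + 1) ""))) ++ "]") := by
  rw [pvChunkLoop_eq ws []]
  by_cases h : ws.length % 2 = 1
  · simp [h]
  · simp only [h, if_false]
    rw [pyRange_two ws.length, List.map_map]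
    have hm : (ws.length + 1) / 2 = ws.length / 2 := by omega
    rw [hm]
    rw [show ((List.range (ws.length / 2)).map
        ((fun i => pvFmt (PySem.List.pyGetD ws i "") (PySem.List.pyGetD ws (i + 1) "")) ∘
          fun (k : Nat) => (0 : Int) + 2 * (k : Int))) =
        (List.range (ws.length / 2)).map
          (fun (k : Nat) => pvFmt (PySem.List.pyGetD ws (0 + 2 * (k : Int)) "")
            (PySem.List.pyGetD ws (0 + 2 * (k : Int) + 1) "")) from rfl]
    rw [pvRangeMap_eq (ws.length / 2) ws (by omega)]
    simp

theorem words_to_object_spec : Claim_equal_words_to_object := by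
  intro s _
  show words_to_object s = words_to_object_alt s
  exact pvKey ((PySem.Str.split? s " ").getD [])
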